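-- pv_equiv track=rewrite | github.com/pypi-data/pypi-mirror-325 | packages/UzbekTokenization/uzbektokenization-1.0.0.tar.gz/uzbektokenization-1.0.0/UzWordTokenization/UzWordTokenizer.py | __gerund
-- ===== SOURCE A (Python) =====
-- def __gerund(tokens):
--     # Save the original tokens to refer back to them later after transformations
--     original_tokens = tokens
--
--     tokens = [item.lower() for item in tokens]
--     new_tokens = [original_tokens[0]]
--
--     # Iterate over the tokens starting from the second token
--     for i in range(1, len(tokens)):
--         # Check if the previous token ends with '-(u)v' and the current token is one of the key words
--         if tokens[i-1][-1] == 'v' and (tokens[i] in ['kerak', 'lozim', 'shart', 'darkor']):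
--             del new_tokens[len(new_tokens)-1]
--             new_tokens.append(original_tokens[i-1] + ' ' + original_tokens[i])
--
--         elif tokens[i-1][-2:] == 'sh' and (tokens[i] in ['kerak', 'lozim', 'shart', 'darkor']):
--             del new_tokens[len(new_tokens)-1]
--             new_tokens.append(original_tokens[i-1] + ' ' + original_tokens[i])
--
--         elif tokens[i-1][-3:] == 'moq' and (tokens[i] in ['kerak', 'lozim', 'shart', 'darkor']):
--             del new_tokens[len(new_tokens)-1]
--             new_tokens.append(original_tokens[i-1] + ' ' + original_tokens[i])
--
--         elif tokens[i-1][-3:] == 'mak' and (tokens[i] in ['kerak', 'lozim', 'shart', 'darkor']):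
--             del new_tokens[len(new_tokens)-1]
--             new_tokens.append(original_tokens[i-1] + ' ' + original_tokens[i])
--
--         # If none of the conditions are met, just add the current token to the new token list
--         else:
--             new_tokens.append(original_tokens[i])
--
--     return new_tokens
-- ===== SOURCE B (Python) =====
-- KEYWORDS = {'kerak', 'lozim', 'shart', 'darkor'}
-- SUFFIXES = ('v', 'sh', 'moq', 'mak')
--
-- def __gerund(tokens):
--     out = []
--     i = 0
--     while i < len(tokens):
--         if (i + 1 < len(tokens)
--                 and tokens[i].lower().endswith(SUFFIXES)
--                 and tokens[i + 1].lower() in KEYWORDS):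
--             out.append(tokens[i] + ' ' + tokens[i + 1])
--             i += 2
--         else:
--             out.append(tokens[i])
--             i += 1
--     return out
-- ===== Notes on version B (the rewrite author's own statement) =====
-- stated objective: simpler
-- what changed: Replaced the append-then-retroactively-delete pass over lowered pairs by a forward look-ahead cursor that consumes the two merged tokens together (sound because a keyword never ends in a gerund suffix, so merges cannot chain), using endswith on a suffix tuple instead of four slice comparisons.
import Mathlib
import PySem

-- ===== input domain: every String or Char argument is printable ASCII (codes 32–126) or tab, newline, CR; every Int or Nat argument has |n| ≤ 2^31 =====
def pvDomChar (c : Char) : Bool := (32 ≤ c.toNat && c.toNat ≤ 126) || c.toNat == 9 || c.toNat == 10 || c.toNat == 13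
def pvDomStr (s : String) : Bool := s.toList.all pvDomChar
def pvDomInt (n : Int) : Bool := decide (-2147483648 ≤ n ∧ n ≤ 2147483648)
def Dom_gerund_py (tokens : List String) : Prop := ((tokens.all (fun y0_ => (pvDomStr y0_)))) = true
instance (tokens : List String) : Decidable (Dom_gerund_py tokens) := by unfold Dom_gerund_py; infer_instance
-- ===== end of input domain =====

-- B replaces A's append-then-retroactively-delete pass by a forward look-ahead cursor that
-- consumes a merged pair of tokens at once (objective: simpler; same O(n) cost).

-- ===== PORT A =====
-- literal transliteration of __gerund: lowercase copy, seed with original_tokens[0], then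
-- for i in range(1, len(tokens)): four suffix branches, each deleting the last accumulated
-- token and appending the merged pair, else appending the current token.
def gerund_py (tokens : List String) : List String :=
  let original_tokens := tokens
  let toks := tokens.map PySem.Str.lower
  (PySem.List.pyRange 1 (PySem.List.len toks) 1).foldl
    (fun new_tokens i =>
      if PySem.Str.pyGet? (PySem.List.pyGetD toks (i - 1) "") (-1) = some 'v' ∧
         PySem.List.pyGetD toks i "" ∈ ["kerak", "lozim", "shart", "darkor"] then
        new_tokens.dropLast ++
          [PySem.List.pyGetD original_tokens (i - 1) "" ++ " " ++ PySem.List.pyGetD original_tokens i ""]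
      else if PySem.Str.slice (PySem.List.pyGetD toks (i - 1) "") (some (-2)) none = "sh" ∧
         PySem.List.pyGetD toks i "" ∈ ["kerak", "lozim", "shart", "darkor"] then
        new_tokens.dropLast ++
          [PySem.List.pyGetD original_tokens (i - 1) "" ++ " " ++ PySem.List.pyGetD original_tokens i ""]
      else if PySem.Str.slice (PySem.List.pyGetD toks (i - 1) "") (some (-3)) none = "moq" ∧
         PySem.List.pyGetD toks i "" ∈ ["kerak", "lozim", "shart", "darkor"] then
        new_tokens.dropLast ++
          [PySem.List.pyGetD original_tokens (i - 1) "" ++ " " ++ PySem.List.pyGetD original_tokens i ""]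
      else if PySem.Str.slice (PySem.List.pyGetD toks (i - 1) "") (some (-3)) none = "mak" ∧
         PySem.List.pyGetD toks i "" ∈ ["kerak", "lozim", "shart", "darkor"] then
        new_tokens.dropLast ++
          [PySem.List.pyGetD original_tokens (i - 1) "" ++ " " ++ PySem.List.pyGetD original_tokens i ""]
      else new_tokens ++ [PySem.List.pyGetD original_tokens i ""])
    [PySem.List.pyGetD original_tokens 0 ""]

-- ===== PORT B =====
def pvKeywords : List String := ["kerak", "lozim", "shart", "darkor"]

def pvIsGerund (s : String) : Bool :=
  PySem.Str.endswith (PySem.Str.lower s) "v" || PySem.Str.endswith (PySem.Str.lower s) "sh" ||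
  PySem.Str.endswith (PySem.Str.lower s) "moq" || PySem.Str.endswith (PySem.Str.lower s) "mak"

def pvMergeCond (x y : String) : Bool :=
  pvIsGerund x && decide (PySem.Str.lower y ∈ pvKeywords)

-- Source B's while-loop with look-ahead cursor i: the cursor is the head of the remaining
-- list; a merge consumes two tokens (i += 2), otherwise one token (i += 1).
def gerund_py_alt : List String → List String
  | [] => []
  | [x] => [x]
  | x :: y :: rest =>
    if pvMergeCond x y then (x ++ " " ++ y) :: gerund_py_alt rest
    else x :: gerund_py_alt (y :: rest)

-- ===== PRECONDITION & SPEC =====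
-- Pre_ excludes exactly the inputs on which the Python A raises IndexError: the empty
-- list (A eagerly reads tokens[0]) and lists with an empty-string non-last token
-- (A indexes tokens[i-1][-1]); B simply returns those tokens unmerged there.
def Pre_gerund_py (tokens : List String) : Prop :=
  tokens ≠ [] ∧ ∀ t ∈ tokens.dropLast, t ≠ ""
instance (tokens : List String) : Decidable (Pre_gerund_py tokens) := by unfold Pre_gerund_py; infer_instance

def pvWitness_gerund_py : List String := ["Olmoq", "kerak", "uy"]

def Spec_gerund_py (tokens : List String) (out : List String) : Prop := out = gerund_py_alt tokens
instance (tokens : List String) (out : List String) : Decidable (Spec_gerund_py tokens out) := by unfold Spec_gerund_py; infer_instance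

-- ===== CLAIM (what is proved, stated in full; the proofs are below) =====
def Claim_equal_gerund_py : Prop := ∀ (tokens : List String), Dom_gerund_py tokens → Pre_gerund_py tokens → Spec_gerund_py tokens (gerund_py tokens)

-- ===== LEMMAS AND PROOFS =====

-- A's loop body as a named step function (gerund_py is definitionally this fold)
def pvStepA (orig : List String) (new_tokens : List String) (i : Int) : List String :=
  let toks := orig.map PySem.Str.lower
  if PySem.Str.pyGet? (PySem.List.pyGetD toks (i - 1) "") (-1) = some 'v' ∧
     PySem.List.pyGetD toks i "" ∈ ["kerak", "lozim", "shart", "darkor"] then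
    new_tokens.dropLast ++
      [PySem.List.pyGetD orig (i - 1) "" ++ " " ++ PySem.List.pyGetD orig i ""]
  else if PySem.Str.slice (PySem.List.pyGetD toks (i - 1) "") (some (-2)) none = "sh" ∧
     PySem.List.pyGetD toks i "" ∈ ["kerak", "lozim", "shart", "darkor"] then
    new_tokens.dropLast ++
      [PySem.List.pyGetD orig (i - 1) "" ++ " " ++ PySem.List.pyGetD orig i ""]
  else if PySem.Str.slice (PySem.List.pyGetD toks (i - 1) "") (some (-3)) none = "moq" ∧
     PySem.List.pyGetD toks i "" ∈ ["kerak", "lozim", "shart", "darkor"] then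
    new_tokens.dropLast ++
      [PySem.List.pyGetD orig (i - 1) "" ++ " " ++ PySem.List.pyGetD orig i ""]
  else if PySem.Str.slice (PySem.List.pyGetD toks (i - 1) "") (some (-3)) none = "mak" ∧
     PySem.List.pyGetD toks i "" ∈ ["kerak", "lozim", "shart", "darkor"] then
    new_tokens.dropLast ++
      [PySem.List.pyGetD orig (i - 1) "" ++ " " ++ PySem.List.pyGetD orig i ""]
  else new_tokens ++ [PySem.List.pyGetD orig i ""]

lemma pv_gerund_py_eq (tokens : List String) :
    gerund_py tokens =
      (PySem.List.pyRange 1 (PySem.List.len (tokens.map PySem.Str.lower)) 1).foldl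
        (pvStepA tokens) [PySem.List.pyGetD tokens 0 ""] := rfl

lemma pv_drop_eq_iff (l p : List Char) : l.drop (l.length - p.length) = p ↔ p <:+ l := by
  constructor
  · intro h; exact h ▸ List.drop_suffix _ _
  · rintro ⟨t, rfl⟩; simp
lemma pv_getLast?_iff (l : List Char) (c : Char) : l.getLast? = some c ↔ [c] <:+ l := by
  rw [List.getLast?_eq_some_iff]
  exact ⟨fun ⟨t, h⟩ => ⟨t, h.symm⟩, fun ⟨t, h⟩ => ⟨t, h.symm⟩⟩
lemma pv_last_v (s : String) :
    (PySem.Str.pyGet? s (-1) = some 'v') ↔ PySem.Str.endswith s "v" = true := by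
  rw [PySem.Str.pyGet?_eq]
  simp only [PySem.Chars.pyGet?_eq_listPyGet?, PySem.List.pyGet?_neg_one,
    PySem.Str.endswith_eq, PySem.Chars.endswith_iff]
  exact pv_getLast?_iff _ _
lemma pv_slice2 (s : String) :
    (PySem.Str.slice s (some (-2)) none = "sh") ↔ PySem.Str.endswith s "sh" = true := by
  rw [← String.toList_inj, PySem.Str.toList_slice]
  simp only [PySem.Chars.slice_eq_listSlice]
  rw [PySem.List.slice_from_neg_ofNat _ 2 (by omega)]
  rw [PySem.Str.endswith_eq, PySem.Chars.endswith_iff, ← pv_drop_eq_iff,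
    show ("sh" : String).toList.length = 2 from rfl]
lemma pv_slice3 (s p : String) (hp : p.toList.length = 3) :
    (PySem.Str.slice s (some (-3)) none = p) ↔ PySem.Str.endswith s p = true := by
  rw [← String.toList_inj, PySem.Str.toList_slice]
  simp only [PySem.Chars.slice_eq_listSlice]
  rw [PySem.List.slice_from_neg_ofNat _ 3 (by omega)]
  rw [PySem.Str.endswith_eq, PySem.Chars.endswith_iff, ← pv_drop_eq_iff, hp]

lemma pv_body_eq (w z : String) (X Y : List String) :
    (if PySem.Str.pyGet? (PySem.Str.lower w) (-1) = some 'v' ∧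
        PySem.Str.lower z ∈ ["kerak", "lozim", "shart", "darkor"] then X
     else if PySem.Str.slice (PySem.Str.lower w) (some (-2)) none = "sh" ∧
        PySem.Str.lower z ∈ ["kerak", "lozim", "shart", "darkor"] then X
     else if PySem.Str.slice (PySem.Str.lower w) (some (-3)) none = "moq" ∧
        PySem.Str.lower z ∈ ["kerak", "lozim", "shart", "darkor"] then X
     else if PySem.Str.slice (PySem.Str.lower w) (some (-3)) none = "mak" ∧
        PySem.Str.lower z ∈ ["kerak", "lozim", "shart", "darkor"] then X
     else Y) = if pvMergeCond w z then X else Y := by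
  have e1 := pv_last_v (PySem.Str.lower w)
  have e2 := pv_slice2 (PySem.Str.lower w)
  have e3 := pv_slice3 (PySem.Str.lower w) "moq" (by decide)
  have e4 := pv_slice3 (PySem.Str.lower w) "mak" (by decide)
  have gi : pvIsGerund w = true ↔
      (PySem.Str.endswith (PySem.Str.lower w) "v" = true ∨
       (PySem.Str.endswith (PySem.Str.lower w) "sh" = true ∨
        (PySem.Str.endswith (PySem.Str.lower w) "moq" = true ∨
         PySem.Str.endswith (PySem.Str.lower w) "mak" = true))) := by
    rw [pvIsGerund]
    simp only [Bool.or_eq_true, or_assoc]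
  have ec : pvMergeCond w z = true ↔
      ((PySem.Str.pyGet? (PySem.Str.lower w) (-1) = some 'v' ∧
        PySem.Str.lower z ∈ ["kerak", "lozim", "shart", "darkor"]) ∨
       ((PySem.Str.slice (PySem.Str.lower w) (some (-2)) none = "sh" ∧
        PySem.Str.lower z ∈ ["kerak", "lozim", "shart", "darkor"]) ∨
       ((PySem.Str.slice (PySem.Str.lower w) (some (-3)) none = "moq" ∧
        PySem.Str.lower z ∈ ["kerak", "lozim", "shart", "darkor"]) ∨
       (PySem.Str.slice (PySem.Str.lower w) (some (-3)) none = "mak" ∧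
        PySem.Str.lower z ∈ ["kerak", "lozim", "shart", "darkor"])))) := by
    rw [pvMergeCond, Bool.and_eq_true, gi, pvKeywords]
    simp only [decide_eq_true_eq]
    rw [e1, e2, e3, e4, or_and_right, or_and_right, or_and_right]
  by_cases hC : pvMergeCond w z = true
  · rw [if_pos hC]
    have hd := ec.mp hC
    split_ifs with h1 h2 h3 h4
    · rfl
    · rfl
    · rfl
    · rfl
    · rcases hd with h | h | h | h
      exacts [absurd h h1, absurd h h2, absurd h h3, absurd h h4]
  · rw [if_neg hC]
    have hnd : ¬ _ := fun h => hC (ec.mpr h)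
    split_ifs with h1 h2 h3 h4
    · exact (hnd (Or.inl h1)).elim
    · exact (hnd (Or.inr (Or.inl h2))).elim
    · exact (hnd (Or.inr (Or.inr (Or.inl h3)))).elim
    · exact (hnd (Or.inr (Or.inr (Or.inr h4)))).elim
    · rfl

lemma pv_keyword_not_gerund (y : String) (h : PySem.Str.lower y ∈ pvKeywords) :
    pvIsGerund y = false := by
  simp only [pvKeywords, List.mem_cons, List.not_mem_nil, or_false] at h
  rcases h with h | h | h | h <;> simp [pvIsGerund, h] <;> decide

lemma pv_cond_false_of_not_kw (x y : String) (h : PySem.Str.lower y ∉ pvKeywords) :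
    pvMergeCond x y = false := by
  rw [pvMergeCond, decide_eq_false h]
  simp

lemma pv_merge_fst_not_keyword (x y : String) (h : pvMergeCond x y = true) :
    PySem.Str.lower x ∉ pvKeywords := by
  intro hk
  have hg := pv_keyword_not_gerund x hk
  rw [pvMergeCond, hg] at h
  simp at h

lemma pv_alt_append (l s : List String)
    (h : ∀ (hl : l ≠ []) (y : String), s.head? = some y → pvMergeCond (l.getLast hl) y = false) :
    gerund_py_alt (l ++ s) = gerund_py_alt l ++ gerund_py_alt s := by
  induction l using gerund_py_alt.induct with
  | case1 => simp [gerund_py_alt]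
  | case2 x =>
    cases s with
    | nil => simp [gerund_py_alt]
    | cons y t =>
      have hc := h (by simp) y rfl
      simp only [List.getLast_singleton] at hc
      simp [gerund_py_alt, hc]
  | case3 x y rest hcond ih =>
    cases rest with
    | nil => simp [gerund_py_alt, hcond]
    | cons z rest' =>
      have h' : ∀ (hl : (z :: rest') ≠ []) (w : String), s.head? = some w →
          pvMergeCond ((z :: rest').getLast hl) w = false := by
        intro hl w hw
        have := h (by simp) w hw
        rwa [List.getLast_cons (by simp), List.getLast_cons (by simp)] at this
      simp [gerund_py_alt, hcond]
      exact ih h'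
  | case4 x y rest hcond ih =>
    have h' : ∀ (hl : (y :: rest) ≠ []) (w : String), s.head? = some w →
        pvMergeCond ((y :: rest).getLast hl) w = false := by
      intro hl w hw
      have := h (by simp) w hw
      rwa [List.getLast_cons (by simp)] at this
    simp [gerund_py_alt, hcond]
    exact ih h'

lemma pv_stepA_eq (orig : List String) (k : Nat) (hk : k + 1 < orig.length) (acc : List String) :
    pvStepA orig acc (1 + (k : Int)) =
      if pvMergeCond (orig[k]'(by omega)) (orig[k + 1]'hk) then
        acc.dropLast ++ [orig[k]'(by omega) ++ " " ++ orig[k + 1]'hk]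
      else acc ++ [orig[k + 1]'hk] := by
  have e1 : (1 : Int) + (k : Int) - 1 = ((k : Nat) : Int) := by omega
  have e2 : (1 : Int) + (k : Int) = (((k + 1 : Nat)) : Int) := by push_cast; omega
  rw [pvStepA]
  rw [e1, e2]
  rw [PySem.List.pyGetD_natCast, PySem.List.pyGetD_natCast,
      PySem.List.pyGetD_natCast, PySem.List.pyGetD_natCast]
  rw [List.getD_eq_getElem _ _ (show k < (orig.map PySem.Str.lower).length by
        rw [List.length_map]; omega),
      List.getD_eq_getElem _ _ (show k + 1 < (orig.map PySem.Str.lower).length by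
        rw [List.length_map]; omega),
      List.getD_eq_getElem _ _ (show k < orig.length by omega),
      List.getD_eq_getElem _ _ hk]
  rw [List.getElem_map, List.getElem_map]
  exact pv_body_eq _ _ _ _
lemma pv_alt_snoc (l : List String) (w : String)
    (hnk : PySem.Str.lower w ∉ pvKeywords) :
    gerund_py_alt (l ++ [w]) = gerund_py_alt l ++ [w] := by
  rw [pv_alt_append _ _ (fun hl y hy => by
    simp only [List.head?_cons, Option.some.injEq] at hy
    subst hy
    exact pv_cond_false_of_not_kw _ _ hnk)]
  simp [gerund_py_alt]

lemma pv_A_loop (orig : List String) (m : Nat) (hm : m < orig.length) :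
    (List.range m).foldl (fun acc (k : Nat) => pvStepA orig acc (1 + (k : Int)))
        [PySem.List.pyGetD orig 0 ""]
      = gerund_py_alt (orig.take (m + 1)) := by
  induction m with
  | zero =>
    have h0 : orig.take 1 = [orig[0]'hm] := by
      rw [List.take_add_one, List.take_zero, List.getElem?_eq_getElem hm]
      rfl
    rw [List.range_zero, List.foldl_nil, h0, PySem.List.pyGetD_zero,
        List.getD_eq_getElem _ _ hm]
    simp [gerund_py_alt]
  | succ m ih =>
    rw [List.range_succ, List.foldl_append, ih (by omega), List.foldl_cons, List.foldl_nil,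
        pv_stepA_eq orig m hm]
    have hw : orig.take (m + 1) = orig.take m ++ [orig[m]'(by omega)] := by
      rw [List.take_add_one, List.getElem?_eq_getElem (by omega : m < orig.length)]
      rfl
    have hz : orig.take (m + 1 + 1) = orig.take (m + 1) ++ [orig[m + 1]'hm] := by
      rw [List.take_add_one, List.getElem?_eq_getElem hm]
      rfl
    by_cases hc : pvMergeCond (orig[m]'(by omega)) (orig[m + 1]'hm) = true
    · rw [if_pos hc]
      have hnkw := pv_merge_fst_not_keyword _ _ hc
      rw [hw, pv_alt_snoc _ _ hnkw, List.dropLast_concat, hz, hw, List.append_assoc]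
      rw [pv_alt_append _ _ (by
        intro hl y hy
        simp only [List.cons_append, List.nil_append, List.head?_cons,
          Option.some.injEq] at hy
        subst hy
        exact pv_cond_false_of_not_kw _ _ hnkw)]
      simp [gerund_py_alt, hc]
    · rw [if_neg hc]
      rw [hz, pv_alt_append _ _ (by
        intro hl y hy
        simp only [List.head?_cons, Option.some.injEq] at hy
        subst hy
        have h1 : (List.take (m + 1) orig).getLast? = some (orig[m]'(by omega)) := by
          rw [hw]
          exact List.getLast?_concat
        rw [List.getLast?_eq_some_getLast hl] at h1
        rw [Option.some.inj h1]
        exact Bool.eq_false_iff.mpr hc)]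
      simp [gerund_py_alt]

-- ===== VERDICT (by name: the statement is the Claim_ definition above) =====
theorem gerund_py_spec : Claim_equal_gerund_py := by
  intro tokens _ hpre
  obtain ⟨hne, -⟩ := hpre
  have hlen : 0 < tokens.length := List.length_pos_of_ne_nil hne
  unfold Spec_gerund_py
  rw [pv_gerund_py_eq, PySem.List.len_eq, List.length_map, PySem.List.pyRange_one]
  have e : ((tokens.length : Int) - 1).toNat = tokens.length - 1 := by omega
  rw [e, List.foldl_map]
  have h := pv_A_loop tokens (tokens.length - 1) (by omega)
  rw [Nat.sub_add_cancel (by omega), List.take_length] at h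
  exact h
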